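-- pv_equiv track=rewrite | github.com/CraazzzyyFoxx/anak-tournaments | backend/tournament-service/src/services/tournament/realtime_commit.py | _merge_updates
-- ===== SOURCE A (Python) =====
-- from collections.abc import Iterable
-- from typing import Any, Literal
--
-- TournamentRealtimeReason = Literal["results_changed", "structure_changed"]
--
-- _RESULTS_CHANGED: TournamentRealtimeReason = "results_changed"
--
-- _STRUCTURE_CHANGED: TournamentRealtimeReason = "structure_changed"
--
-- def _merge_updates(
--     updates: Iterable[tuple[int, TournamentRealtimeReason]],
-- ) -> list[tuple[int, TournamentRealtimeReason]]:
--     reasons_by_tournament: dict[int, set[TournamentRealtimeReason]] = {}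
--     for tournament_id, reason in updates:
--         reasons_by_tournament.setdefault(tournament_id, set()).add(reason)
--
--     merged: list[tuple[int, TournamentRealtimeReason]] = []
--     for tournament_id, reasons in sorted(reasons_by_tournament.items()):
--         if _STRUCTURE_CHANGED in reasons:
--             merged.append((tournament_id, _STRUCTURE_CHANGED))
--         elif _RESULTS_CHANGED in reasons:
--             merged.append((tournament_id, _RESULTS_CHANGED))
--     return merged
-- ===== SOURCE B (Python) =====
-- _RESULTS_CHANGED = "results_changed"
-- _STRUCTURE_CHANGED = "structure_changed"
--
-- def _merge_updates(updates):
--     # Sort the recognized update pairs lexicographically: within one tournament id,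
--     # "results_changed" < "structure_changed", so the last pair of each run of
--     # equal ids carries the strongest reason; one scan collapses the runs.
--     events = sorted(p for p in updates
--                     if p[1] in (_RESULTS_CHANGED, _STRUCTURE_CHANGED))
--     merged = []
--     for pair in events:
--         if merged and merged[-1][0] == pair[0]:
--             merged[-1] = pair
--         else:
--             merged.append(pair)
--     return merged
-- ===== Notes on version B (the rewrite author's own statement) =====
-- stated objective: alternative
-- what changed: B builds no per-id grouping structure at all: it filters out unrecognized reasons, sorts the raw update pairs lexicographically (tuple order puts results_changed before structure_changed), and collapses runs of equal ids in one linear scan keeping each run's last pair, which is automatically the strongest reason.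
import Mathlib
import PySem

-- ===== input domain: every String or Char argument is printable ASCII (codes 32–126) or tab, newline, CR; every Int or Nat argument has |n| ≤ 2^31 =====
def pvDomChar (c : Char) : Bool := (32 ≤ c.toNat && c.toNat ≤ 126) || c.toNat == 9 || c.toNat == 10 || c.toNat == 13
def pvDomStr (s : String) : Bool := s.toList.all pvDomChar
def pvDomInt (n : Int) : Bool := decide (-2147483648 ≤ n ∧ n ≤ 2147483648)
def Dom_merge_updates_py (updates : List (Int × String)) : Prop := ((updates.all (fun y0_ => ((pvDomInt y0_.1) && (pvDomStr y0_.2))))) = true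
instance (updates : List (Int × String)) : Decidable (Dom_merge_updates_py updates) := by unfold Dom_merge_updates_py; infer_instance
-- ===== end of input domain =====

-- B uses no dict at all: it sorts the recognized update pairs lexicographically and collapses
-- runs of equal ids in one scan, keeping each run's last (strongest) pair; objective: alternative.

-- ===== PORT A =====
def merge_updates_py (updates : List (Int × String)) : List (Int × String) :=
  let reasons_by_tournament : PySem.Dict Int (PySem.Set String) :=
    updates.foldl (fun d p => d.modify p.1 [] (fun s => PySem.Set.add s p.2)) PySem.Dict.empty
  -- sorted(reasons_by_tournament.items()): dict keys are distinct, so Python's tuple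
  -- comparison never reaches the second component and reduces to comparing the ids
  (PySem.List.sorted reasons_by_tournament.items (fun p => p.1)).foldl
    (fun merged p =>
      if PySem.Set.contains p.2 "structure_changed" then merged ++ [(p.1, "structure_changed")]
      else if PySem.Set.contains p.2 "results_changed" then merged ++ [(p.1, "results_changed")]
      else merged) []

-- ===== PORT B =====
def merge_updates_py_alt (updates : List (Int × String)) : List (Int × String) :=
  let events := PySem.List.sorted2
    (updates.filter (fun p => p.2 == "results_changed" || p.2 == "structure_changed"))
    (fun p => p.1) (fun p => p.2)
  events.foldl (fun merged pair =>
    -- 'if merged and merged[-1][0] == pair[0]: merged[-1] = pair  else: merged.append(pair)'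
    match merged.getLast? with
    | some lastp => if lastp.1 == pair.1 then merged.dropLast ++ [pair] else merged ++ [pair]
    | none => merged ++ [pair]) []

-- ===== PRECONDITION & SPEC =====
def Spec_merge_updates_py (updates : List (Int × String)) (out : List (Int × String)) : Prop := out = merge_updates_py_alt updates
instance (updates : List (Int × String)) (out : List (Int × String)) : Decidable (Spec_merge_updates_py updates out) := by unfold Spec_merge_updates_py; infer_instance

-- ===== CLAIM (what is proved, stated in full; the proofs are below) =====
def Claim_equal_merge_updates_py : Prop := ∀ (updates : List (Int × String)), Dom_merge_updates_py updates → Spec_merge_updates_py updates (merge_updates_py updates)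

-- ===== LEMMAS AND PROOFS =====

-- the canonical membership predicate both outputs satisfy
def pvMem (updates : List (Int × String)) (t : Int) (r : String) : Prop :=
  ((t, "structure_changed") ∈ updates ∧ r = "structure_changed") ∨
  ((t, "structure_changed") ∉ updates ∧ (t, "results_changed") ∈ updates ∧ r = "results_changed")

-- ---- A side ----

theorem pvA_getD_mem (l : List (Int × String)) (d : PySem.Dict Int (PySem.Set String)) (t : Int) (r : String) :
    r ∈ (l.foldl (fun d p => d.modify p.1 [] (fun s => PySem.Set.add s p.2)) d).getD t [] ↔
      r ∈ d.getD t [] ∨ (t, r) ∈ l := by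
  induction l generalizing d with
  | nil => simp
  | cons p l ih =>
    obtain ⟨a, b⟩ := p
    simp only [List.foldl_cons, ih, PySem.Dict.getD_modify, List.mem_cons, Prod.mk.injEq]
    by_cases h : t = a
    · subst h
      simp [PySem.Set.mem_add]
      tauto
    · simp [h]

theorem pvA_keys (l : List (Int × String)) (t : Int) :
    t ∈ (l.foldl (fun d p => d.modify p.1 [] (fun s => PySem.Set.add s p.2))
          (PySem.Dict.empty : PySem.Dict Int (PySem.Set String))).keys ↔ t ∈ l.map Prod.fst := by
  rw [PySem.Dict.keys_foldl_modify_key l (fun p => p.1) [] (fun _ p s => PySem.Set.add s p.2)]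
  simp [PySem.Set.mem_update, PySem.Dict.keys_empty]

theorem pvA_nodup (l : List (Int × String)) :
    (l.foldl (fun d p => d.modify p.1 [] (fun s => PySem.Set.add s p.2))
      (PySem.Dict.empty : PySem.Dict Int (PySem.Set String))).keys.Nodup :=
  PySem.Dict.nodup_keys_foldl_modify_key l (fun p => p.1) [] (fun _ p s => PySem.Set.add s p.2) _
    PySem.Dict.nodup_keys_empty

def pvGA (p : Int × PySem.Set String) : Option (Int × String) :=
  if PySem.Set.contains p.2 "structure_changed" then some (p.1, "structure_changed")
  else if PySem.Set.contains p.2 "results_changed" then some (p.1, "results_changed")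
  else none

-- A's append loop is the filterMap of pvGA
theorem pvFoldl_ga (l : List (Int × PySem.Set String)) (acc : List (Int × String)) :
    l.foldl (fun merged p =>
      if PySem.Set.contains p.2 "structure_changed" then merged ++ [(p.1, "structure_changed")]
      else if PySem.Set.contains p.2 "results_changed" then merged ++ [(p.1, "results_changed")]
      else merged) acc = acc ++ l.filterMap pvGA := by
  induction l generalizing acc with
  | nil => simp
  | cons x l ih =>
    rw [List.foldl_cons, List.filterMap_cons]
    by_cases hc1 : PySem.Set.contains x.2 "structure_changed" = true
    · rw [if_pos hc1, ih,
        show pvGA x = some (x.1, "structure_changed") from by unfold pvGA; rw [if_pos hc1]]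
      simp
    · rw [if_neg hc1]
      by_cases hc2 : PySem.Set.contains x.2 "results_changed" = true
      · rw [if_pos hc2, ih,
          show pvGA x = some (x.1, "results_changed") from by unfold pvGA; rw [if_neg hc1, if_pos hc2]]
        simp
      · rw [if_neg hc2, ih,
          show pvGA x = none from by unfold pvGA; rw [if_neg hc1, if_neg hc2]]

theorem pvOutA_eq (updates : List (Int × String)) :
    merge_updates_py updates
      = (PySem.List.sorted (updates.foldl (fun d p => d.modify p.1 [] (fun s => PySem.Set.add s p.2))
          (PySem.Dict.empty : PySem.Dict Int (PySem.Set String))).items (fun p => p.1)).filterMap pvGA := by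
  simp only [merge_updates_py]
  exact (pvFoldl_ga _ []).trans (List.nil_append _)

theorem pvOutA_mem (updates : List (Int × String)) (t : Int) (r : String) :
    (t, r) ∈ merge_updates_py updates ↔ pvMem updates t r := by
  rw [pvOutA_eq, List.mem_filterMap]
  constructor
  · rintro ⟨⟨a, s⟩, hmem, hg⟩
    rw [(PySem.List.sorted_perm _ _ _).mem_iff,
        ← PySem.Dict.get?_eq_some_iff_mem_items _ _ _ (pvA_nodup updates)] at hmem
    have hsD : (updates.foldl (fun d p => d.modify p.1 [] (fun s => PySem.Set.add s p.2))
        (PySem.Dict.empty : PySem.Dict Int (PySem.Set String))).getD a [] = s := by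
      rw [PySem.Dict.getD_eq_get?_getD, hmem]; rfl
    have hst := pvA_getD_mem updates PySem.Dict.empty a "structure_changed"
    have hre := pvA_getD_mem updates PySem.Dict.empty a "results_changed"
    rw [hsD] at hst hre
    simp only [PySem.Dict.getD_empty, List.not_mem_nil, false_or] at hst hre
    unfold pvGA at hg
    split_ifs at hg with h1 h2
    · rw [PySem.Set.contains_iff] at h1
      simp only [Option.some.injEq, Prod.mk.injEq] at hg
      obtain ⟨rfl, rfl⟩ := hg
      exact Or.inl ⟨hst.mp h1, rfl⟩
    · rw [PySem.Set.contains_iff] at h1 h2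
      simp only [Option.some.injEq, Prod.mk.injEq] at hg
      obtain ⟨rfl, rfl⟩ := hg
      exact Or.inr ⟨fun hc => h1 (hst.mpr hc), hre.mp h2, rfl⟩
  · intro hm
    set dA := updates.foldl (fun d p => d.modify p.1 [] (fun s => PySem.Set.add s p.2))
      (PySem.Dict.empty : PySem.Dict Int (PySem.Set String)) with hdA
    have hst := pvA_getD_mem updates PySem.Dict.empty t "structure_changed"
    have hre := pvA_getD_mem updates PySem.Dict.empty t "results_changed"
    rw [← hdA] at hst hre
    simp only [PySem.Dict.getD_empty, List.not_mem_nil, false_or] at hst hre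
    have hkey : t ∈ dA.keys := by
      rw [hdA, pvA_keys]
      rcases hm with ⟨hs, _⟩ | ⟨_, hr, _⟩
      · exact List.mem_map.mpr ⟨_, hs, rfl⟩
      · exact List.mem_map.mpr ⟨_, hr, rfl⟩
    have hget : dA.get? t = some (dA.getD t []) := by
      cases hq : dA.get? t with
      | none => exact absurd ((PySem.Dict.get?_eq_none_iff_not_mem_keys dA t).mp hq) (by simpa using hkey)
      | some v => rw [PySem.Dict.getD_eq_get?_getD, hq]; rfl
    refine ⟨(t, dA.getD t []), ?_, ?_⟩
    · rw [(PySem.List.sorted_perm _ _ _).mem_iff,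
        ← PySem.Dict.get?_eq_some_iff_mem_items _ _ _ (hdA ▸ pvA_nodup updates)]
      exact hget
    · unfold pvGA
      rcases hm with ⟨hs, rfl⟩ | ⟨hns, hr, rfl⟩
      · rw [if_pos (PySem.Set.contains_iff .. |>.mpr (hst.mpr hs))]
      · rw [if_neg, if_pos (PySem.Set.contains_iff .. |>.mpr (hre.mpr hr))]
        rw [PySem.Set.contains_iff]
        exact fun hc => hns (hst.mp hc)

theorem pvSorted_items_lt {ν : Type} (d : PySem.Dict Int ν) (hnd : d.keys.Nodup) :
    List.Pairwise (fun p q : Int × ν => p.1 < q.1) (PySem.List.sorted d.items (fun p => p.1)) := by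
  have hle := PySem.List.sorted_pairwise d.items (fun p : Int × ν => p.1)
  have hperm : (List.map Prod.fst (PySem.List.sorted d.items (fun p => p.1))).Perm (List.map Prod.fst d.items) :=
    (PySem.List.sorted_perm d.items (fun p : Int × ν => p.1) false).map Prod.fst
  have hnd' : (List.map Prod.fst (PySem.List.sorted d.items (fun p => p.1))).Nodup :=
    hperm.nodup_iff.mpr hnd
  have hne : List.Pairwise (fun p q : Int × ν => p.1 ≠ q.1) (PySem.List.sorted d.items (fun p => p.1)) :=
    List.pairwise_map.mp hnd'
  exact (hle.and hne).imp (fun h => lt_of_le_of_ne h.1 h.2)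

theorem pvOutA_pairwise (updates : List (Int × String)) :
    List.Pairwise (fun p q : Int × String => p.1 < q.1) (merge_updates_py updates) := by
  rw [pvOutA_eq]
  refine List.Pairwise.filterMap pvGA ?_ (pvSorted_items_lt _ (pvA_nodup updates))
  intro p q hpq b hb b' hb'
  have h1 : b.1 = p.1 := by
    unfold pvGA at hb
    split_ifs at hb <;> (injection hb with hb2; exact (congrArg Prod.fst hb2).symm)
  have h2 : b'.1 = q.1 := by
    unfold pvGA at hb'
    split_ifs at hb' <;> (injection hb' with hb2; exact (congrArg Prod.fst hb2).symm)
  omega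

-- ---- B side ----

-- the lexicographic (Python tuple) order on pairs
def pvLe (a b : Int × String) : Prop := a.1 < b.1 ∨ (a.1 = b.1 ∧ a.2 ≤ b.2)

-- the boolean comparator sorted2 uses at k1 = fst, k2 = snd
def pvLtB (a b : Int × String) : Bool :=
  decide (a.1 < b.1) || !decide (b.1 < a.1) && decide (a.2 < b.2)

theorem pvLtB_false_iff (a b : Int × String) : pvLtB b a = false ↔ pvLe a b := by
  unfold pvLtB pvLe
  rcases lt_trichotomy a.1 b.1 with h | h | h
  · simp [h, not_lt_of_gt h]
  · simp only [h, lt_irrefl, decide_false, Bool.false_or, Bool.not_false, Bool.true_and]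
    simp [not_lt]
  · simp [h, not_lt_of_gt h]
    omega

theorem pvLtB_true_le (a b : Int × String) (h : pvLtB a b = true) : pvLe a b := by
  unfold pvLtB at h
  unfold pvLe
  simp only [Bool.or_eq_true, Bool.and_eq_true, Bool.not_eq_eq_eq_not, Bool.not_true,
    decide_eq_true_eq, decide_eq_false_iff_not] at h
  rcases h with h1 | ⟨h1, h2⟩
  · exact Or.inl h1
  · have hle : a.1 ≤ b.1 := by omega
    rcases lt_or_eq_of_le hle with h3 | h3
    · exact Or.inl h3
    · exact Or.inr ⟨h3, le_of_lt h2⟩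

theorem pvLe_trans (a b c : Int × String) (h1 : pvLe a b) (h2 : pvLe b c) : pvLe a c := by
  unfold pvLe at *
  rcases h1 with h1 | ⟨h1, h1'⟩ <;> rcases h2 with h2 | ⟨h2, h2'⟩
  · exact Or.inl (lt_trans h1 h2)
  · exact Or.inl (h2 ▸ h1)
  · exact Or.inl (h1 ▸ h2)
  · exact Or.inr ⟨h1.trans h2, le_trans h1' h2'⟩

theorem pvInsertBy_pairwise (x : Int × String) (ys : List (Int × String))
    (h : List.Pairwise pvLe ys) :
    List.Pairwise pvLe (PySem.List.insertBy pvLtB x ys) := by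
  induction ys with
  | nil => simp [PySem.List.insertBy]
  | cons y ys ih =>
    rw [List.pairwise_cons] at h
    by_cases hb : pvLtB x y = true
    · have hxy : pvLe x y := pvLtB_true_le x y hb
      rw [show PySem.List.insertBy pvLtB x (y :: ys) = x :: y :: ys from by
        simp [PySem.List.insertBy, hb]]
      rw [List.pairwise_cons]
      refine ⟨?_, List.pairwise_cons.mpr h⟩
      intro z hz
      rcases List.mem_cons.mp hz with rfl | hz
      · exact hxy
      · exact pvLe_trans x y z hxy (h.1 z hz)
    · have hyx : pvLe y x := (pvLtB_false_iff y x).mp (by simpa using hb)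
      rw [show PySem.List.insertBy pvLtB x (y :: ys) = y :: PySem.List.insertBy pvLtB x ys from by
        simp [PySem.List.insertBy, hb]]
      rw [List.pairwise_cons]
      refine ⟨?_, ih h.2⟩
      intro z hz
      rw [PySem.List.mem_insertBy] at hz
      rcases hz with rfl | hz
      · exact hyx
      · exact h.1 z hz

theorem pvSorted2_pairwise (xs : List (Int × String)) :
    List.Pairwise pvLe (PySem.List.sorted2 xs (fun p => p.1) (fun p => p.2)) := by
  have h : PySem.List.sorted2 xs (fun p : Int × String => p.1) (fun p => p.2)
      = xs.foldl (fun acc x => PySem.List.insertBy pvLtB x acc) [] := rfl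
  rw [h]
  have key : ∀ (l : List (Int × String)) (acc : List (Int × String)), List.Pairwise pvLe acc →
      List.Pairwise pvLe (l.foldl (fun acc x => PySem.List.insertBy pvLtB x acc) acc) := by
    intro l
    induction l with
    | nil => exact fun acc h => h
    | cons x l ih => exact fun acc h => ih _ (pvInsertBy_pairwise x acc h)
  exact key xs [] List.Pairwise.nil

-- the B loop's step function
def pvStepB (merged : List (Int × String)) (pair : Int × String) : List (Int × String) :=
  match merged.getLast? with
  | some lastp => if lastp.1 == pair.1 then merged.dropLast ++ [pair] else merged ++ [pair]
  | none => merged ++ [pair]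

-- run-collapsing, written as structural recursion
def pvCollapse : List (Int × String) → List (Int × String)
  | [] => []
  | [p] => [p]
  | p :: q :: l => if p.1 = q.1 then pvCollapse (q :: l) else p :: pvCollapse (q :: l)

theorem pvFoldB_append (l : List (Int × String)) (acc m : List (Int × String)) (hm : m ≠ []) :
    l.foldl pvStepB (acc ++ m) = acc ++ l.foldl pvStepB m := by
  induction l generalizing m with
  | nil => simp
  | cons p l ih =>
    rw [List.foldl_cons, List.foldl_cons]
    rcases m.eq_nil_or_concat with rfl | ⟨m', q, rfl⟩
    · exact absurd rfl hm
    rw [List.concat_eq_append]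
    have h1 : pvStepB (acc ++ (m' ++ [q])) p
        = acc ++ pvStepB (m' ++ [q]) p := by
      unfold pvStepB
      rw [show acc ++ (m' ++ [q]) = (acc ++ m') ++ [q] from by simp,
          List.getLast?_concat, List.getLast?_concat]
      dsimp only
      by_cases h : q.1 == p.1
      · rw [if_pos h, if_pos h, List.dropLast_concat, List.dropLast_concat]
        simp
      · rw [if_neg h, if_neg h]
        simp
    rw [h1]
    have h2 : pvStepB (m' ++ [q]) p ≠ [] := by
      unfold pvStepB
      rw [List.getLast?_concat]
      dsimp only
      by_cases h : q.1 == p.1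
      · rw [if_pos h]; simp
      · rw [if_neg h]; simp
    exact ih _ h2

theorem pvFoldB_single (l : List (Int × String)) (p : Int × String) :
    l.foldl pvStepB [p] = pvCollapse (p :: l) := by
  induction l generalizing p with
  | nil => rfl
  | cons q l ih =>
    rw [List.foldl_cons]
    by_cases h : p.1 = q.1
    · have hs : pvStepB [p] q = [q] := by
        unfold pvStepB
        simp [h]
      rw [hs, ih, pvCollapse, if_pos h]
    · have hs : pvStepB [p] q = [p] ++ [q] := by
        unfold pvStepB
        simp [h]
      rw [hs, pvFoldB_append l [p] [q] (by simp), ih, pvCollapse, if_neg h]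
      rfl

theorem pvFoldB_eq_collapse (l : List (Int × String)) :
    l.foldl pvStepB [] = pvCollapse l := by
  cases l with
  | nil => rfl
  | cons p l =>
    rw [List.foldl_cons, show pvStepB [] p = [p] from rfl, pvFoldB_single]

theorem pvCollapse_subset (l : List (Int × String)) :
    ∀ x ∈ pvCollapse l, x ∈ l := by
  induction l with
  | nil => intro x hx; exact absurd hx (by simp [pvCollapse])
  | cons p l ih =>
    cases l with
    | nil => intro x hx; exact hx
    | cons q m =>
      intro x hx
      rw [pvCollapse] at hx
      split_ifs at hx with h
      · exact List.mem_cons_of_mem p (ih x hx)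
      · rcases List.mem_cons.mp hx with rfl | hx
        · exact List.mem_cons_self
        · exact List.mem_cons_of_mem p (ih x hx)

theorem pvCollapse_pairwise (l : List (Int × String)) (h : List.Pairwise pvLe l) :
    List.Pairwise (fun p q : Int × String => p.1 < q.1) (pvCollapse l) := by
  induction l with
  | nil => simp [pvCollapse]
  | cons p l ih =>
    cases l with
    | nil => simp [pvCollapse]
    | cons q m =>
      rw [List.pairwise_cons] at h
      rw [pvCollapse]
      split_ifs with heq
      · exact ih h.2
      · rw [List.pairwise_cons]
        refine ⟨?_, ih h.2⟩
        intro z hz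
        have hz' := pvCollapse_subset _ z hz
        have hpq : pvLe p q := h.1 q List.mem_cons_self
        have hplt : p.1 < q.1 := by
          rcases hpq with h1 | ⟨h1, _⟩
          · exact h1
          · exact absurd h1 heq
        rcases List.mem_cons.mp hz' with rfl | hz'
        · exact hplt
        · have hqz : pvLe q z := (List.pairwise_cons.mp h.2).1 z hz'
          rcases hqz with h1 | ⟨h1, _⟩
          · exact lt_trans hplt h1
          · exact h1 ▸ hplt

-- collapse keeps, for each id, exactly the pairs with a maximal second component
theorem pvCollapse_mem_max (l : List (Int × String)) (hs : List.Pairwise pvLe l)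
    (t : Int) (r : String) :
    (t, r) ∈ pvCollapse l ↔ ((t, r) ∈ l ∧ ∀ s, (t, s) ∈ l → s ≤ r) := by
  induction l with
  | nil => simp [pvCollapse]
  | cons p l ih =>
    cases l with
    | nil =>
      simp only [pvCollapse, List.mem_singleton, Prod.ext_iff] at *
      constructor
      · rintro ⟨rfl, rfl⟩
        exact ⟨⟨rfl, rfl⟩, fun s hsm => le_of_eq hsm.2⟩
      · rintro ⟨⟨rfl, rfl⟩, _⟩
        exact ⟨rfl, rfl⟩
    | cons q m =>
      rw [List.pairwise_cons] at hs
      have ihqm := ih hs.2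
      have hpq : pvLe p q := hs.1 q List.mem_cons_self
      rw [pvCollapse]
      split_ifs with heq
      · -- p is overwritten by the rest of its run
        rw [ihqm]
        have hple : p.2 ≤ q.2 := by
          rcases hpq with h1 | ⟨_, h2⟩
          · exact absurd heq (by omega)
          · exact h2
        constructor
        · rintro ⟨hmem, hmax⟩
          refine ⟨List.mem_cons_of_mem p hmem, ?_⟩
          intro s hsm
          rcases List.mem_cons.mp hsm with hsp | hsm'
          · -- the pair is p itself: its value is dominated by q's, which is dominated by r
            have ht : t = p.1 := (Prod.ext_iff.mp hsp.symm).1.symm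
            have hsv : s = p.2 := (Prod.ext_iff.mp hsp.symm).2.symm
            have hq : (t, q.2) ∈ q :: m := by
              have hqe : q = (t, q.2) := Prod.ext_iff.mpr ⟨by rw [ht, heq], rfl⟩
              rw [← hqe]
              exact List.mem_cons_self
            exact le_trans (hsv ▸ hple) (hmax q.2 hq)
          · exact hmax s hsm'
        · rintro ⟨hmem, hmax⟩
          refine ⟨?_, fun s hsm => hmax s (List.mem_cons_of_mem p hsm)⟩
          rcases List.mem_cons.mp hmem with hp | hmem'
          · -- (t, r) is p itself: then q carries the same id and a value ≥ r, forcing q = (t, r)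
            have ht : t = p.1 := (Prod.ext_iff.mp hp).1
            have hr : r = p.2 := (Prod.ext_iff.mp hp).2
            have hq : (t, q.2) ∈ p :: q :: m := by
              have hqe : q = (t, q.2) := Prod.ext_iff.mpr ⟨by rw [ht, heq], rfl⟩
              rw [← hqe]
              exact List.mem_cons_of_mem p List.mem_cons_self
            have hqr : q.2 ≤ r := hmax q.2 hq
            have hrq : r ≤ q.2 := hr ▸ hple
            have hqe : q = (t, r) := Prod.ext_iff.mpr ⟨by rw [ht, heq], le_antisymm hqr hrq⟩
            rw [← hqe]
            exact List.mem_cons_self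
          · exact hmem'
      · -- p starts its own run: its id is strictly below every id in q :: m
        have hplt : p.1 < q.1 := by
          rcases hpq with h1 | ⟨h1, _⟩
          · exact h1
          · exact absurd h1 heq
        have hfresh : ∀ z ∈ q :: m, p.1 < z.1 := by
          intro z hz
          rcases List.mem_cons.mp hz with rfl | hz
          · exact hplt
          · have hqz : pvLe q z := (List.pairwise_cons.mp hs.2).1 z hz
            rcases hqz with h1 | ⟨h1, _⟩
            · exact lt_trans hplt h1
            · exact h1 ▸ hplt
        rw [List.mem_cons, ihqm]
        constructor
        · rintro (hp | ⟨hmem, hmax⟩)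
          · have ht : t = p.1 := (Prod.ext_iff.mp hp).1
            refine ⟨hp ▸ List.mem_cons_self, ?_⟩
            intro s hsm
            rcases List.mem_cons.mp hsm with hsp | hsm'
            · exact le_of_eq (((Prod.ext_iff.mp hsp).2).trans ((Prod.ext_iff.mp hp).2).symm)
            · exact absurd (ht ▸ hfresh (t, s) hsm') (lt_irrefl _)
          · have ht : p.1 < t := hfresh (t, r) hmem
            refine ⟨List.mem_cons_of_mem p hmem, ?_⟩
            intro s hsm
            rcases List.mem_cons.mp hsm with hsp | hsm'
            · exact absurd ((Prod.ext_iff.mp hsp.symm).1 ▸ ht) (lt_irrefl _)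
            · exact hmax s hsm'
        · rintro ⟨hmem, hmax⟩
          rcases List.mem_cons.mp hmem with hp | hmem'
          · exact Or.inl hp
          · exact Or.inr ⟨hmem', fun s hsm => hmax s (List.mem_cons_of_mem p hsm)⟩

-- values taken by the filtered list's second components
def pvTwoVal (l : List (Int × String)) : Prop :=
  ∀ x ∈ l, x.2 = "results_changed" ∨ x.2 = "structure_changed"

theorem pvRS_lt : ("results_changed" : String) < "structure_changed" := by
  rw [String.lt_iff_toList_lt]
  decide

-- on a two-valued list the maximal pair is structure_changed if present, else results_changed
theorem pvCollapse_mem (l : List (Int × String)) (hs : List.Pairwise pvLe l)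
    (hv : pvTwoVal l) (t : Int) (r : String) :
    (t, r) ∈ pvCollapse l ↔
      (((t, "structure_changed") ∈ l ∧ r = "structure_changed") ∨
       ((t, "structure_changed") ∉ l ∧ (t, "results_changed") ∈ l ∧ r = "results_changed")) := by
  rw [pvCollapse_mem_max l hs t r]
  constructor
  · rintro ⟨hmem, hmax⟩
    have hrv := hv (t, r) hmem
    rcases hrv with hr | hr
    · have hr' : r = "results_changed" := hr
      refine Or.inr ⟨?_, hr' ▸ hmem, hr'⟩
      intro hc
      exact absurd (lt_of_lt_of_le pvRS_lt (hr' ▸ hmax "structure_changed" hc)) (lt_irrefl _)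
    · have hr' : r = "structure_changed" := hr
      exact Or.inl ⟨hr' ▸ hmem, hr'⟩
  · rintro (⟨hmem, rfl⟩ | ⟨hnS, hmem, rfl⟩)
    · refine ⟨hmem, ?_⟩
      intro s hsm
      rcases hv (t, s) hsm with hs' | hs'
      · exact (show s = "results_changed" from hs') ▸ le_of_lt pvRS_lt
      · exact le_of_eq (show s = "structure_changed" from hs')
    · refine ⟨hmem, ?_⟩
      intro s hsm
      rcases hv (t, s) hsm with hs' | hs'
      · exact le_of_eq (show s = "results_changed" from hs')
      · exact absurd ((show s = "structure_changed" from hs') ▸ hsm) hnS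

-- B's output as collapse of the sorted filtered list
theorem pvOutB_eq (updates : List (Int × String)) :
    merge_updates_py_alt updates
      = pvCollapse (PySem.List.sorted2
          (updates.filter (fun p => p.2 == "results_changed" || p.2 == "structure_changed"))
          (fun p => p.1) (fun p => p.2)) := by
  simp only [merge_updates_py_alt]
  exact pvFoldB_eq_collapse _

theorem pvEvents_twoval (updates : List (Int × String)) :
    pvTwoVal (PySem.List.sorted2
      (updates.filter (fun p => p.2 == "results_changed" || p.2 == "structure_changed"))
      (fun p => p.1) (fun p => p.2)) := by
  intro x hx
  rw [(PySem.List.sorted2_perm _ _ _ _).mem_iff, List.mem_filter] at hx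
  have := hx.2
  simp only [Bool.or_eq_true, beq_iff_eq] at this
  tauto

theorem pvEvents_mem (updates : List (Int × String)) (t : Int) (s : String)
    (hs : s = "results_changed" ∨ s = "structure_changed") :
    ((t, s) ∈ PySem.List.sorted2
      (updates.filter (fun p => p.2 == "results_changed" || p.2 == "structure_changed"))
      (fun p => p.1) (fun p => p.2)) ↔ (t, s) ∈ updates := by
  rw [(PySem.List.sorted2_perm _ _ _ _).mem_iff, List.mem_filter]
  constructor
  · exact fun h => h.1
  · intro h
    refine ⟨h, ?_⟩
    rcases hs with rfl | rfl <;> simp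

theorem pvOutB_mem (updates : List (Int × String)) (t : Int) (r : String) :
    (t, r) ∈ merge_updates_py_alt updates ↔ pvMem updates t r := by
  rw [pvOutB_eq, pvCollapse_mem _ (pvSorted2_pairwise _) (pvEvents_twoval updates),
      pvEvents_mem updates t "structure_changed" (Or.inr rfl),
      pvEvents_mem updates t "results_changed" (Or.inl rfl)]
  rfl

theorem pvOutB_pairwise (updates : List (Int × String)) :
    List.Pairwise (fun p q : Int × String => p.1 < q.1) (merge_updates_py_alt updates) := by
  rw [pvOutB_eq]
  exact pvCollapse_pairwise _ (pvSorted2_pairwise _)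

-- ===== VERDICT (by name: the statement is the Claim_ definition above) =====
theorem merge_updates_py_spec : Claim_equal_merge_updates_py := by
  intro updates _
  unfold Spec_merge_updates_py
  have hA := pvOutA_pairwise updates
  have hB := pvOutB_pairwise updates
  have hndA : (merge_updates_py updates).Nodup := hA.imp (fun h => by
    intro he; rw [he] at h; omega)
  have hndB : (merge_updates_py_alt updates).Nodup := hB.imp (fun h => by
    intro he; rw [he] at h; omega)
  have hperm : (merge_updates_py updates).Perm (merge_updates_py_alt updates) := by
    rw [List.perm_ext_iff_of_nodup hndA hndB]
    rintro ⟨t, r⟩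
    rw [pvOutA_mem, pvOutB_mem]
  exact List.Perm.eq_of_pairwise (fun a b _ _ h1 h2 => absurd h2 (by omega)) hA hB hperm
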